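-- pv_equiv track=rewrite | github.com/stefvh/path_shepherding | utils/sorting.py | find_n_seq
-- ===== SOURCE A (Python) =====
-- def find_n_seq(ll, n):
--     row_ids = []
--     for i, r in enumerate(ll):
--         window = list(ll[i:i+n])
--         rg = list(range(r, r+n))
--         if len(window) < n:
--             break
--         if window == rg:
--             row_ids.append(r)
--     return row_ids
-- ===== SOURCE B (Python) =====
-- def find_n_seq(ll, n):
--     # One right-to-left pass: run[i] = length of the maximal consecutive run
--     # starting at index i; then keep the values whose run is at least n.
--     m = len(ll)
--     run = [1] * m
--     for i in range(m - 2, -1, -1):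
--         if ll[i + 1] == ll[i] + 1:
--             run[i] = run[i + 1] + 1
--     return [x for x, k in zip(ll, run) if k >= n]
-- ===== Notes on version B (the rewrite author's own statement) =====
-- stated objective: faster
-- what changed: Replaces A's per-index window/range-list comparison (an O(n) check at every position) by a single right-to-left pass that precomputes consecutive-run lengths and then thresholds them by n.
-- intended difference: For n < 0 with -n < len(ll), A returns only the last len(ll)+n elements (an accident of Python's negative-slice clamping in ll[i:i+n]); B returns all of ll, the intended value since every element trivially starts a run of length >= n when n < 0 -- exactly what A itself returns for n = 0 and for lists with len(ll) <= -n. — e.g. on find_n_seq([0, 1], -1): A returns [1], B returns [0, 1]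
import Mathlib
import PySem

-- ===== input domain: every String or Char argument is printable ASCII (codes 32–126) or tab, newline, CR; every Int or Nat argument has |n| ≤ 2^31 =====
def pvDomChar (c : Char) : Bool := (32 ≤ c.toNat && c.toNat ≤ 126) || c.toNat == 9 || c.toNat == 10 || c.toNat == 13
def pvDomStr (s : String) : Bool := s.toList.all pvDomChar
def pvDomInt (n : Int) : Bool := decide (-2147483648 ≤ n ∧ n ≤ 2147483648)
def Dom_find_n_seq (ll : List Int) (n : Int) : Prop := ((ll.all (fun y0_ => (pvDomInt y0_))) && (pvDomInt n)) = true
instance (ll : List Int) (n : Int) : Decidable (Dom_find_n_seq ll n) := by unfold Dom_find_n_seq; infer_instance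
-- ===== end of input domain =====

-- B replaces A's per-index window/range comparison by a single right-to-left pass that
-- precomputes consecutive-run lengths and thresholds them by n (objective: faster).

-- ===== PORT A =====
-- the for-loop over enumerate(ll) with its break, as structural recursion over the enumerate list
def findA_go (ll : List Int) (n : Int) : List (Int × Int) → List Int → List Int
  | [], acc => acc
  | (i, r) :: rest, acc =>
      let window := PySem.List.slice ll (some i) (some (i + n))
      let rg := PySem.List.pyRange r (r + n) 1
      if (window.length : Int) < n then acc
      else if window = rg then findA_go ll n rest (acc ++ [r])
      else findA_go ll n rest acc

def find_n_seq (ll : List Int) (n : Int) : List Int :=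
  findA_go ll n (PySem.List.enumerate ll 0) []

-- ===== PORT B =====
-- run[i] = length of the maximal consecutive run starting at i, computed right-to-left
def runLens : List Int → List Nat
  | [] => []
  | x :: rest =>
      let rs := runLens rest
      (match rest, rs with
       | y :: _, k :: _ => if y = x + 1 then k + 1 else 1
       | _, _ => 1) :: rs

def find_n_seq_alt (ll : List Int) (n : Int) : List Int :=
  (ll.zip (runLens ll)).filterMap (fun p => if n ≤ (p.2 : Int) then some p.1 else none)

-- ===== PRECONDITION & SPEC =====
-- For n < 0 with -n < len(ll), A returns only the last len(ll)+n elements — an accident of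
-- Python's negative-slice clamping in ll[i:i+n] — while B returns all of ll, the intended
-- value since every element trivially starts a run of length ≥ n when n < 0, exactly what A
-- itself returns for n = 0 and for lists with len(ll) ≤ -n.
def D_find_n_seq (ll : List Int) (n : Int) : Prop := n < 0 ∧ -n < (ll.length : Int)
instance (ll : List Int) (n : Int) : Decidable (D_find_n_seq ll n) := by unfold D_find_n_seq; infer_instance

def Spec_find_n_seq (ll : List Int) (n : Int) (out : List Int) : Prop :=
  ¬ D_find_n_seq ll n → out = find_n_seq_alt ll n
instance (ll : List Int) (n : Int) (out : List Int) : Decidable (Spec_find_n_seq ll n out) := by unfold Spec_find_n_seq; infer_instance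

def pvDiffWitness_find_n_seq : List Int × Int := ([0, 1], -1)
def pvDiffWitnessOut_find_n_seq : (List Int) × (List Int) := ([1], [0, 1])

-- ===== CLAIM (what is proved, stated in full; the proofs are below) =====
def Claim_unchanged_find_n_seq : Prop := ∀ (ll : List Int) (n : Int), Dom_find_n_seq ll n → Spec_find_n_seq ll n (find_n_seq ll n)
def Claim_changed_find_n_seq : Prop := Dom_find_n_seq (pvDiffWitness_find_n_seq.1) (pvDiffWitness_find_n_seq.2) ∧ D_find_n_seq (pvDiffWitness_find_n_seq.1) (pvDiffWitness_find_n_seq.2) ∧ find_n_seq (pvDiffWitness_find_n_seq.1) (pvDiffWitness_find_n_seq.2) = pvDiffWitnessOut_find_n_seq.1 ∧ find_n_seq_alt (pvDiffWitness_find_n_seq.1) (pvDiffWitness_find_n_seq.2) = pvDiffWitnessOut_find_n_seq.2 ∧ pvDiffWitnessOut_find_n_seq.1 ≠ pvDiffWitnessOut_find_n_seq.2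
def Claim_exact_find_n_seq : Prop := ∀ (ll : List Int) (n : Int), Dom_find_n_seq ll n → D_find_n_seq ll n → find_n_seq ll n ≠ find_n_seq_alt ll n

-- ===== LEMMAS AND PROOFS =====
lemma runLens_cons (x : Int) (rest : List Int) :
    runLens (x :: rest) = (runLens (x :: rest)).headD 0 :: runLens rest := by
  cases rest with
  | nil => simp [runLens]
  | cons y t => simp [runLens]

lemma headD_runLens_cons_cons (x y : Int) (t : List Int) :
    (runLens (x :: y :: t)).headD 0 = if y = x + 1 then (runLens (y :: t)).headD 0 + 1 else 1 := by
  conv_lhs => rw [runLens, runLens_cons y t]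
  simp
  cases t <;> simp [runLens]

lemma headD_runLens_pos (x : Int) (rest : List Int) :
    1 ≤ (runLens (x :: rest)).headD 0 := by
  cases rest with
  | nil => simp [runLens]
  | cons y t => rw [headD_runLens_cons_cons]; split <;> omega

lemma consec_succ (x y : Int) (l : List Int) (m : Nat) :
    ((y :: l).take (m+1) = PySem.List.pyRange x (x + ((m+1 : Nat) : Int)) 1)
    ↔ (y = x ∧ l.take m = PySem.List.pyRange (x+1) ((x+1) + (m : Int)) 1) := by
  have h1 : (x:Int) < x + ((m+1:Nat):Int) := by push_cast; omega
  rw [PySem.List.pyRange_one_cons h1]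
  have h2 : x + (((m+1:Nat)):Int) = (x+1) + (m:Int) := by push_cast; ring
  rw [h2]
  simp

lemma run_iff (l : List Int) : ∀ (x : Int) (m : Nat),
    m ≤ (runLens (x :: l)).headD 0 ↔
      (m ≤ l.length + 1 ∧ (x :: l).take m = PySem.List.pyRange x (x + (m : Int)) 1) := by
  induction l with
  | nil =>
      intro x m
      match m with
      | 0 => simp [runLens]
      | 1 => rw [consec_succ x x [] 0]; simp [runLens]
      | (m+2) =>
          constructor
          · intro h; simp [runLens] at h
          · rintro ⟨h, -⟩; simp at h
  | cons y t ih =>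
      intro x m
      match m with
      | 0 => simp
      | (m+1) =>
          rw [headD_runLens_cons_cons, consec_succ x x (y :: t) m]
          match m with
          | 0 =>
              have hp := headD_runLens_pos y t
              simp
              split <;> omega
          | (m+1) =>
              rw [consec_succ (x+1) y t m]
              by_cases hy : y = x + 1
              · subst hy
                have h := ih (x+1) (m+1)
                rw [consec_succ (x+1) (x+1) t m] at h
                simp only [List.length_cons] at h ⊢
                push_cast at h ⊢
                simp at h ⊢
                constructor
                · intro hle
                  obtain ⟨h1, h2⟩ := h.mp (by omega)
                  exact ⟨by omega, h2⟩
                · rintro ⟨h1, h2⟩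
                  have := h.mpr ⟨by omega, h2⟩
                  omega
              · simp [hy]

def runHead (l : List Int) : Nat := (runLens l).headD 0

lemma runLens_cons' (x : Int) (rest : List Int) :
    runLens (x :: rest) = runHead (x :: rest) :: runLens rest := runLens_cons x rest

lemma runHead_pos (x : Int) (rest : List Int) : 1 ≤ runHead (x :: rest) := headD_runLens_pos x rest

lemma runHead_iff (l : List Int) (x : Int) (m : Nat) :
    m ≤ runHead (x :: l) ↔
      (m ≤ l.length + 1 ∧ (x :: l).take m = PySem.List.pyRange x (x + (m : Int)) 1) := run_iff l x m

lemma runHead_le (x : Int) (rest : List Int) : runHead (x :: rest) ≤ rest.length + 1 :=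
  ((runHead_iff rest x (runHead (x :: rest))).mp le_rfl).1

def gsuf (n : Int) : List Int → List Int
  | [] => []
  | x :: rest =>
      if (((x :: rest).length : Int)) < n then []
      else (if (x :: rest).take n.toNat = PySem.List.pyRange x (x + n) 1 then [x] else []) ++ gsuf n rest

lemma alt_cons (x : Int) (rest : List Int) (n : Int) :
    find_n_seq_alt (x :: rest) n =
      (if n ≤ ((runHead (x :: rest) : Nat) : Int) then [x] else []) ++ find_n_seq_alt rest n := by
  unfold find_n_seq_alt
  rw [runLens_cons']
  simp only [List.zip_cons_cons, List.filterMap_cons]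
  by_cases hc : n ≤ ((runHead (x :: rest) : Nat) : Int)
  · simp [hc]
  · simp [hc]

lemma alt_all (ll : List Int) (n : Int) (hn : n ≤ 0) : find_n_seq_alt ll n = ll := by
  induction ll with
  | nil => rfl
  | cons x rest ih =>
      rw [alt_cons, ih]
      have h1 := runHead_pos x rest
      have : n ≤ ((runHead (x :: rest) : Nat) : Int) := by omega
      simp [this]

lemma alt_short (ll : List Int) (n : Int) (hn : 0 < n) (h : (ll.length : Int) < n) :
    find_n_seq_alt ll n = [] := by
  induction ll with
  | nil => rfl
  | cons x rest ih =>
      rw [alt_cons, ih (by simp at h ⊢; omega)]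
      have h1 := runHead_le x rest
      have : ¬ n ≤ ((runHead (x :: rest) : Nat) : Int) := by simp at h; push_cast; omega
      simp [this]

lemma alt_eq_gsuf (ll : List Int) (n : Int) (hn : 0 < n) : find_n_seq_alt ll n = gsuf n ll := by
  induction ll with
  | nil => rfl
  | cons x rest ih =>
      rw [alt_cons, ih, gsuf]
      by_cases hshort : ((x :: rest).length : Int) < n
      · rw [if_pos hshort]
        have h1 := runHead_le x rest
        have hc : ¬ n ≤ ((runHead (x :: rest) : Nat) : Int) := by
          simp at hshort; push_cast; omega
        rw [if_neg hc, ← ih, alt_short rest n hn (by simp at hshort ⊢; omega)]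
        simp
      · rw [if_neg hshort]
        have hlen : n.toNat ≤ rest.length + 1 := by simp at hshort; omega
        have hiff := runHead_iff rest x n.toNat
        have hx : x + (n.toNat : Int) = x + n := by
          rw [Int.toNat_of_nonneg (by omega)]
        rw [hx] at hiff
        by_cases hc : (x :: rest).take n.toNat = PySem.List.pyRange x (x + n) 1
        · have : n ≤ ((runHead (x :: rest) : Nat) : Int) := by
            have := hiff.mpr ⟨hlen, hc⟩
            omega
          rw [if_pos this, if_pos hc]
        · have : ¬ n ≤ ((runHead (x :: rest) : Nat) : Int) := by
            intro hle
            exact hc (hiff.mp (by omega)).2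
          rw [if_neg this, if_neg hc]

lemma drop_succ_of_drop_cons {ll rest : List Int} {x : Int} {j : Nat}
    (h : ll.drop j = x :: rest) : ll.drop (j+1) = rest := by
  rw [← List.tail_drop, h]
  rfl

lemma A_go_pos (ll : List Int) (n : Int) (hn : 0 < n) :
    ∀ (l : List Int) (j : Nat) (acc : List Int), ll.drop j = l →
      findA_go ll n (PySem.List.enumerate l (j : Int)) acc = acc ++ gsuf n l := by
  intro l
  induction l with
  | nil => intro j acc h; simp [PySem.List.enumerate, findA_go, gsuf]
  | cons x rest ih =>
      intro j acc h
      rw [PySem.List.enumerate_cons]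
      simp only [findA_go]
      have hb : (j : Int) + n = (j : Int) + ((n.toNat : Nat) : Int) := by
        rw [Int.toNat_of_nonneg (by omega)]
      rw [hb, PySem.List.slice_natCast_add, h]
      have hlen : ((x :: rest).take n.toNat).length = min n.toNat (rest.length + 1) := by
        simp [List.length_take]
      by_cases hshort : ((x :: rest).length : Int) < n
      · have : (((x :: rest).take n.toNat).length : Int) < n := by
          simp at hshort; rw [hlen]; omega
        rw [if_pos this, gsuf, if_pos hshort]
        simp
      · have hfull : ¬ (((x :: rest).take n.toNat).length : Int) < n := by
          simp at hshort; rw [hlen]; omega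
        rw [if_neg hfull, gsuf, if_neg hshort]
        have hcast : (j : Int) + 1 = ((j+1 : Nat) : Int) := by push_cast; ring
        have hdrop := drop_succ_of_drop_cons h
        by_cases hc : (x :: rest).take n.toNat = PySem.List.pyRange x (x + n) 1
        · rw [if_pos hc, if_pos hc, hcast, ih (j+1) (acc ++ [x]) hdrop]
          simp
        · rw [if_neg hc, if_neg hc, hcast, ih (j+1) acc hdrop]
          simp

lemma slice_all_nil (ll : List Int) (n : Int) (j : Nat) (hj : j < ll.length)
    (hn : n ≤ 0) (h : n = 0 ∨ (ll.length : Int) + n ≤ 0) :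
    PySem.List.slice ll (some (j : Int)) (some ((j : Int) + n)) = [] := by
  apply List.eq_nil_of_length_eq_zero
  rw [PySem.List.length_slice]
  by_cases hbn : 0 ≤ (j:Int) + n
  · have hb : (j : Int) + n = (((((j:Int)+n).toNat) : Nat) : Int) := by
      rw [Int.toNat_of_nonneg hbn]
    rw [hb, PySem.List.clampIdx_natCast, PySem.List.clampIdx_natCast]
    have : ((j:Int)+n).toNat ≤ j := by omega
    omega
  · have hk : 0 < (-((j:Int)+n)).toNat := by omega
    have hcast : (((-((j:Int)+n)).toNat : Nat) : Int) = -((j:Int)+n) := Int.toNat_of_nonneg (by omega)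
    have hb : (j : Int) + n = -(((-((j:Int)+n)).toNat : Nat) : Int) := by omega
    rw [hb, PySem.List.clampIdx_neg_natCast _ _ hk, PySem.List.clampIdx_natCast]
    rcases h with h0 | hle
    · omega
    · omega

lemma lt_length_of_drop_cons {ll rest : List Int} {x : Int} {j : Nat}
    (h : ll.drop j = x :: rest) : j < ll.length := by
  by_contra hj
  rw [List.drop_eq_nil_of_le (by omega)] at h
  simp at h

lemma A_go_all (ll : List Int) (n : Int) (hn : n ≤ 0) (h : n = 0 ∨ (ll.length : Int) + n ≤ 0) :
    ∀ (l : List Int) (j : Nat) (acc : List Int), ll.drop j = l →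
      findA_go ll n (PySem.List.enumerate l (j : Int)) acc = acc ++ l := by
  intro l
  induction l with
  | nil => intro j acc hdrop; simp [PySem.List.enumerate, findA_go]
  | cons x rest ih =>
      intro j acc hdrop
      rw [PySem.List.enumerate_cons]
      simp only [findA_go]
      rw [slice_all_nil ll n j (lt_length_of_drop_cons hdrop) hn h]
      rw [PySem.List.pyRange_one_eq_nil (by omega : x + n ≤ x)]
      rw [if_neg (by simp; omega), if_pos rfl]
      have hcast : (j : Int) + 1 = ((j+1 : Nat) : Int) := by push_cast; ring
      rw [hcast, ih (j+1) (acc ++ [x]) (drop_succ_of_drop_cons hdrop)]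
      simp

lemma slice_drop_ge (ll : List Int) (n : Int) (j : Nat) (hn : n < 0)
    (hge : (-n).toNat ≤ j) :
    PySem.List.slice ll (some (j : Int)) (some ((j : Int) + n)) = [] := by
  apply List.eq_nil_of_length_eq_zero
  rw [PySem.List.length_slice]
  have hb : (j : Int) + n = ((j - (-n).toNat : Nat) : Int) := by
    have : (((-n).toNat : Nat) : Int) = -n := Int.toNat_of_nonneg (by omega)
    omega
  rw [hb, PySem.List.clampIdx_natCast, PySem.List.clampIdx_natCast]
  omega

lemma slice_drop_lt (ll : List Int) (n : Int) (j : Nat) (hn : n < 0)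
    (hlen : 0 < (ll.length : Int) + n) (hlt : j < (-n).toNat) :
    (PySem.List.slice ll (some (j : Int)) (some ((j : Int) + n))).length
      = ll.length - (-n).toNat := by
  rw [PySem.List.length_slice]
  have hk : 0 < ((-n).toNat - j : Nat) := by omega
  have hc1 : (((-n).toNat : Nat) : Int) = -n := Int.toNat_of_nonneg (by omega)
  have hb : (j : Int) + n = -((((-n).toNat - j : Nat) : Nat) : Int) := by
    omega
  rw [hb, PySem.List.clampIdx_neg_natCast _ _ hk, PySem.List.clampIdx_natCast]
  omega

lemma A_go_drop (ll : List Int) (n : Int) (hn : n < 0) (h : 0 < (ll.length : Int) + n) :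
    ∀ (l : List Int) (j : Nat) (acc : List Int), ll.drop j = l →
      findA_go ll n (PySem.List.enumerate l (j : Int)) acc = acc ++ l.drop ((-n).toNat - j) := by
  intro l
  induction l with
  | nil => intro j acc hdrop; simp [PySem.List.enumerate, findA_go]
  | cons x rest ih =>
      intro j acc hdrop
      rw [PySem.List.enumerate_cons]
      simp only [findA_go]
      rw [PySem.List.pyRange_one_eq_nil (by omega : x + n ≤ x)]
      have hcast : (j : Int) + 1 = ((j+1 : Nat) : Int) := by push_cast; ring
      by_cases hj : (-n).toNat ≤ j
      · rw [slice_drop_ge ll n j hn hj]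
        rw [if_neg (by simp; omega), if_pos rfl]
        rw [hcast, ih (j+1) (acc ++ [x]) (drop_succ_of_drop_cons hdrop)]
        have h1 : (-n).toNat - j = 0 := by omega
        have h2 : (-n).toNat - (j+1) = 0 := by omega
        simp [h1, h2]
      · have hlenw := slice_drop_lt ll n j hn h (by omega)
        have hwne : PySem.List.slice ll (some (j:Int)) (some ((j:Int) + n)) ≠ [] := by
          intro hnil
          rw [hnil] at hlenw
          simp at hlenw
          have : (-n).toNat < ll.length := by
            have : (((-n).toNat : Nat) : Int) = -n := Int.toNat_of_nonneg (by omega)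
            omega
          omega
        rw [if_neg (by simp; omega), if_neg hwne]
        rw [hcast, ih (j+1) acc (drop_succ_of_drop_cons hdrop)]
        have h3 : (-n).toNat - j = ((-n).toNat - (j+1)) + 1 := by omega
        rw [h3]
        simp [List.drop_succ_cons]

theorem main_unchanged (ll : List Int) (n : Int) (hD : ¬ D_find_n_seq ll n) :
    find_n_seq ll n = find_n_seq_alt ll n := by
  unfold find_n_seq
  by_cases hn : 0 < n
  · have hA := A_go_pos ll n hn ll 0 [] (by simp)
    simp only [Nat.cast_zero] at hA
    rw [hA, alt_eq_gsuf ll n hn]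
    simp
  · have hn' : n ≤ 0 := by omega
    have hcase : n = 0 ∨ (ll.length : Int) + n ≤ 0 := by
      by_cases h0 : n = 0
      · exact Or.inl h0
      · right
        unfold D_find_n_seq at hD
        have hnd : ¬ (-n < (ll.length : Int)) := fun hlt => hD ⟨by omega, hlt⟩
        omega
    have hA := A_go_all ll n hn' hcase ll 0 [] (by simp)
    simp only [Nat.cast_zero] at hA
    rw [hA, alt_all ll n hn']
    simp

theorem main_tight (ll : List Int) (n : Int) (hD : D_find_n_seq ll n) :
    find_n_seq ll n ≠ find_n_seq_alt ll n := by
  obtain ⟨hn, hlen⟩ := hD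
  have hA := A_go_drop ll n hn (by omega) ll 0 [] (by simp)
  simp only [Nat.cast_zero] at hA
  unfold find_n_seq
  rw [hA, alt_all ll n (by omega)]
  have hk : (((-n).toNat : Nat) : Int) = -n := Int.toNat_of_nonneg (by omega)
  intro heq
  have := congrArg List.length heq
  simp [List.length_drop] at this
  omega

-- ===== VERDICT (by name: the statement is the Claim_ definition above) =====
theorem find_n_seq_spec : Claim_unchanged_find_n_seq := by
  intro ll n _ hD
  exact main_unchanged ll n hD

theorem find_n_seq_changed : Claim_changed_find_n_seq := by
  unfold Claim_changed_find_n_seq; decide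

theorem find_n_seq_tight : Claim_exact_find_n_seq := by
  intro ll n _ hD
  exact main_tight ll n hD
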